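-- pv_equiv track=rewrite | github.com/AlphaXZero/ipap | chap13/tilegame.py | do_merge
-- ===== SOURCE A (Python) =====
-- def do_merge(board: list, direction: int, vertical=0) -> list:
--     """
--     merge all the adjacent number in the desired direction
--     """
--     if direction in (2, 4):
--         board = [list(filter(lambda x: x != 0, row)) for row in board]
--         board = [i[::-1] for i in board] if direction == 2 else board
--         for row in board:
--             for j in range(len(row) - 1):
--                 if row[j + 1] == row[j]:
--                     row[j] *= 2
--                     row[j + 1] = 0
--         board = [i[::-1] for i in board] if direction == 2 else board
--         return (
--             rotate_board(add_zeros(board, direction))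
--             if vertical
--             else add_zeros(board, direction)
--         )
--     if direction == 1:
--         return do_merge(rotate_board(board), 4, 1)
--     return do_merge(rotate_board(board), 2, 1)
--
-- def rotate_board(board: list) -> list:
--     """
--     invert vertical and horizontal lines
--     """
--     return [list(row) for row in zip(*board)]
--
-- def add_zeros(board: list, direction: int, vertical=0) -> list:
--     """
--     complete a row with zeros needed in the right direction
--     """
--     clrd_board = []
--     board = [list(filter(lambda x: x != 0, row)) for row in board]
--     for row in board:
--         zero_list = [0] * (4 - len(row))
--         clrd_board.append(zero_list + row if direction == 2 else row + zero_list)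
--     return clrd_board
-- ===== SOURCE B (Python) =====
-- def _transpose(board):
--     return [list(col) for col in zip(*board)]
--
-- def _merge_vals(vals):
--     # consume one element per step, or two when an adjacent pair matches
--     out = []
--     i = 0
--     n = len(vals)
--     while i < n:
--         if i + 1 < n and vals[i] == vals[i + 1]:
--             out.append(2 * vals[i])
--             i += 2
--         else:
--             out.append(vals[i])
--             i += 1
--     return out
--
-- def _line_low(row):
--     m = _merge_vals([x for x in row if x != 0])
--     return m + [0] * (4 - len(m))
--
-- def _line_high(row):
--     m = _merge_vals([x for x in row if x != 0][::-1])[::-1]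
--     return [0] * (4 - len(m)) + m
--
-- def do_merge(board: list, direction: int, vertical=0) -> list:
--     if direction in (2, 4):
--         line = _line_high if direction == 2 else _line_low
--         merged = [line(row) for row in board]
--         return _transpose(merged) if vertical else merged
--     if direction == 1:
--         return _transpose([_line_low(row) for row in _transpose(board)])
--     return _transpose([_line_high(row) for row in _transpose(board)])
-- ===== Notes on version B (the rewrite author's own statement) =====
-- stated objective: simpler
-- what changed: Replaces A's mutate-in-place index loop plus double zero-filter/re-pad passes and self-recursion with a single greedy merge_line helper (drop zeros, merge adjacent pairs by consuming one or two elements, pad) mapped over the transposed/reversed lines; no mutation, no recursion into do_merge itself.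
import Mathlib
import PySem

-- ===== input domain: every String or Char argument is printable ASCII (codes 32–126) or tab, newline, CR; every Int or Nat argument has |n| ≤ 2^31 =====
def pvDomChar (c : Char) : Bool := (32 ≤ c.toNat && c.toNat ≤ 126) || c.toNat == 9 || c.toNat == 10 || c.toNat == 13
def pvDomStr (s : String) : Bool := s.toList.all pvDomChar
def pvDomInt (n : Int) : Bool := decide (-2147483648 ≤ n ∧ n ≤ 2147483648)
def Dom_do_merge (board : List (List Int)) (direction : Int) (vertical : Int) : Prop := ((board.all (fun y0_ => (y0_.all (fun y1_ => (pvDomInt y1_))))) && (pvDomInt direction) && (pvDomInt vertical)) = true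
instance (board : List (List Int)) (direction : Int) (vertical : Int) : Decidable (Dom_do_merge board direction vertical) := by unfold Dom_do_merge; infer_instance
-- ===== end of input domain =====

-- B replaces A's in-place index loop, double zero-filter passes and self-recursion by one
-- greedy merge-line helper mapped over (transposed/reversed) lines; objective: simpler.
-- Neither program mutates its arguments (A rebinds to fresh lists).

-- ===== PORT A =====

-- shared helper: exact port of Python's zip(*board) (rows truncated to the shortest row);
-- the fuel r0.length is never the binding constraint, so this is exact.
def pyZipTAux : Nat → List (List Int) → List (List Int)
  | 0, _ => []
  | n + 1, b =>
    if b.all (fun r => !r.isEmpty) then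
      (b.map (fun r => r.headD 0)) :: pyZipTAux n (b.map List.tail)
    else []

def pyZipT (b : List (List Int)) : List (List Int) :=
  match b with
  | [] => []
  | r0 :: rest => pyZipTAux r0.length (r0 :: rest)

-- list(filter(lambda x: x != 0, row))
def filterNZ (row : List Int) : List Int := row.filter (fun x => x != 0)

-- one iteration of A's inner j-loop (row[j+1] == row[j] → row[j] *= 2; row[j+1] = 0)
def mergeStep (r : List Int) (j : Nat) : List Int :=
  if r.getD (j + 1) 0 = r.getD j 0 then (r.set j (2 * r.getD j 0)).set (j + 1) 0 else r

-- for j in range(len(row) - 1): …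
def mergeLoop (row : List Int) : List Int :=
  (List.range (row.length - 1)).foldl mergeStep row

def add_zeros (board : List (List Int)) (direction : Int) : List (List Int) :=
  (board.map filterNZ).map (fun row =>
    if direction = 2 then List.replicate (4 - row.length) 0 ++ row
    else row ++ List.replicate (4 - row.length) 0)

def do_merge (board : List (List Int)) (direction : Int) (vertical : Int) : List (List Int) :=
  if direction = 2 ∨ direction = 4 then
    let b1 := board.map filterNZ
    let b2 := if direction = 2 then b1.map List.reverse else b1
    let b3 := b2.map mergeLoop
    let b4 := if direction = 2 then b3.map List.reverse else b3
    if vertical ≠ 0 then pyZipT (add_zeros b4 direction) else add_zeros b4 direction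
  else if direction = 1 then do_merge (pyZipT board) 4 1
  else do_merge (pyZipT board) 2 1
termination_by (if direction = 2 ∨ direction = 4 then 0 else 1 : Nat)
decreasing_by all_goals simp_all

-- ===== PORT B =====

-- greedy pair merge over a zero-free line: consume two on a match, else one
def mergeVals : List Int → List Int
  | [] => []
  | [x] => [x]
  | x :: y :: t => if x = y then (2 * x) :: mergeVals t else x :: mergeVals (y :: t)

def lineLow (row : List Int) : List Int :=
  let m := mergeVals (filterNZ row)
  m ++ List.replicate (4 - m.length) 0

def lineHigh (row : List Int) : List Int :=
  let m := (mergeVals (filterNZ row).reverse).reverse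
  List.replicate (4 - m.length) 0 ++ m

def do_merge_alt (board : List (List Int)) (direction : Int) (vertical : Int) : List (List Int) :=
  if direction = 2 ∨ direction = 4 then
    let merged := board.map (fun row => if direction = 2 then lineHigh row else lineLow row)
    if vertical ≠ 0 then pyZipT merged else merged
  else if direction = 1 then pyZipT ((pyZipT board).map lineLow)
  else pyZipT ((pyZipT board).map lineHigh)

-- ===== PRECONDITION & SPEC =====
def Spec_do_merge (board : List (List Int)) (direction : Int) (vertical : Int) (out : List (List Int)) : Prop := out = do_merge_alt board direction vertical
instance (board : List (List Int)) (direction : Int) (vertical : Int) (out : List (List Int)) : Decidable (Spec_do_merge board direction vertical out) := by unfold Spec_do_merge; infer_instance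

-- ===== CLAIM (what is proved, stated in full; the proofs are below) =====
def Claim_equal_do_merge : Prop := ∀ (board : List (List Int)) (direction : Int) (vertical : Int), Dom_do_merge board direction vertical → Spec_do_merge board direction vertical (do_merge board direction vertical)

-- ===== LEMMAS AND PROOFS =====

-- what A's in-place loop produces on a zero-free line: merged pairs with the explicit 0 left behind
def mergeZ : List Int → List Int
  | [] => []
  | [x] => [x]
  | x :: y :: t => if x = y then (2 * x) :: 0 :: mergeZ t else x :: mergeZ (y :: t)

theorem getD_append_len {p l : List Int} {i : Nat} {d : Int} :
    (p ++ l).getD (p.length + i) d = l.getD i d := by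
  simp [List.getD, List.getElem?_append_right]

theorem set_append_len {p l : List Int} {i : Nat} {v : Int} :
    (p ++ l).set (p.length + i) v = p ++ l.set i v := by
  induction p with
  | nil => simp
  | cons a p ih => simp [Nat.succ_add, ih]

theorem loop_eq_mergeZ (l : List Int) : ∀ (p : List Int), (∀ x ∈ l, x ≠ 0) →
    (List.range' p.length (l.length - 1)).foldl mergeStep (p ++ l) = p ++ mergeZ l := by
  induction l using mergeZ.induct with
  | case1 => intro p _; simp [mergeZ]
  | case2 x => intro p _; simp [mergeZ]
  | case3 x t ih =>
    intro p hzf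
    have h0 : (p ++ x :: x :: t).getD p.length 0 = x := by
      simpa using (getD_append_len (p := p) (l := x :: x :: t) (i := 0) (d := 0))
    have h1 : (p ++ x :: x :: t).getD (p.length + 1) 0 = x :=
      getD_append_len (p := p) (l := x :: x :: t) (i := 1) (d := 0)
    have hstep : mergeStep (p ++ x :: x :: t) p.length = p ++ (2 * x) :: 0 :: t := by
      rw [mergeStep, if_pos (h1.trans h0.symm), h0]
      have s0 : (p ++ x :: x :: t).set p.length (2 * x) = p ++ (2 * x) :: x :: t := by
        simpa using (set_append_len (p := p) (l := x :: x :: t) (i := 0) (v := 2 * x))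
      rw [s0]
      simpa using (set_append_len (p := p) (l := (2 * x) :: x :: t) (i := 1) (v := 0))
    cases t with
    | nil =>
      rw [show (x :: x :: ([] : List Int)).length - 1 = 0 + 1 from rfl,
        List.range'_succ, List.foldl_cons, hstep]
      simp [mergeZ]
    | cons z t' =>
      have hz : z ≠ 0 := hzf z (by simp)
      rw [show (x :: x :: z :: t').length - 1 = ((z :: t').length - 1) + 1 + 1 from by
        simp [List.length]]
      rw [List.range'_succ, List.foldl_cons, hstep, List.range'_succ, List.foldl_cons]
      have g1 : (p ++ (2 * x) :: 0 :: z :: t').getD (p.length + 1) 0 = 0 :=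
        getD_append_len (p := p) (l := (2 * x) :: 0 :: z :: t') (i := 1) (d := 0)
      have g2 : (p ++ (2 * x) :: 0 :: z :: t').getD (p.length + 1 + 1) 0 = z := by
        rw [show p.length + 1 + 1 = p.length + 2 from rfl]
        exact getD_append_len (p := p) (l := (2 * x) :: 0 :: z :: t') (i := 2) (d := 0)
      have hnoop : mergeStep (p ++ (2 * x) :: 0 :: z :: t') (p.length + 1)
          = p ++ (2 * x) :: 0 :: z :: t' := by
        rw [mergeStep, if_neg]
        rw [g1, g2]
        exact hz
      rw [hnoop]
      have hih := ih (p ++ [2 * x, 0]) (fun w hw => hzf w (by simp [hw]))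
      rw [List.append_assoc] at hih
      simp only [List.length_append, List.length_cons, List.length_nil, List.cons_append,
        List.nil_append] at hih
      rw [show p.length + 1 + 1 = p.length + (0 + 1 + 1) from by omega]
      simp only [List.length_cons, Nat.add_sub_cancel] at hih ⊢
      rw [hih]
      simp [mergeZ]
  | case4 x y t hxy ih =>
    intro p hzf
    have h0 : (p ++ x :: y :: t).getD p.length 0 = x := by
      simpa using (getD_append_len (p := p) (l := x :: y :: t) (i := 0) (d := 0))
    have h1 : (p ++ x :: y :: t).getD (p.length + 1) 0 = y :=
      getD_append_len (p := p) (l := x :: y :: t) (i := 1) (d := 0)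
    have hstep : mergeStep (p ++ x :: y :: t) p.length = p ++ x :: y :: t := by
      rw [mergeStep, if_neg]
      rw [h0, h1]
      exact fun h => hxy h.symm
    rw [show (x :: y :: t).length - 1 = ((y :: t).length - 1) + 1 from by simp [List.length]]
    rw [List.range'_succ, List.foldl_cons, hstep]
    have hih := ih (p ++ [x]) (fun w hw => hzf w (by simp [hw]))
    rw [List.append_assoc] at hih
    simp only [List.length_append, List.length_cons, List.length_nil, List.cons_append,
      List.nil_append] at hih
    rw [show p.length + 1 = p.length + (0 + 1) from by omega]
    simp only [List.length_cons, Nat.add_sub_cancel] at hih ⊢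
    rw [hih]
    simp [mergeZ, hxy]

theorem mergeLoop_eq (l : List Int) (h : ∀ x ∈ l, x ≠ 0) : mergeLoop l = mergeZ l := by
  have := loop_eq_mergeZ l [] h
  simpa [mergeLoop, List.range_eq_range'] using this

theorem filter_mergeZ (l : List Int) (h : ∀ x ∈ l, x ≠ 0) : filterNZ (mergeZ l) = mergeVals l := by
  induction l using mergeZ.induct with
  | case1 => simp [mergeZ, mergeVals, filterNZ]
  | case2 x =>
    have := h x (by simp)
    simp [mergeZ, mergeVals, filterNZ, this]
  | case3 x t ih =>
    have hx : x ≠ 0 := h x (by simp)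
    have h2x : (2 : Int) * x ≠ 0 := mul_ne_zero (by norm_num) hx
    have hih := ih (fun z hz => h z (by simp [hz]))
    simp only [mergeZ, mergeVals, if_pos rfl, filterNZ, List.filter_cons] at *
    simp [h2x, hih]
  | case4 x y t hxy ih =>
    have hx : x ≠ 0 := h x (by simp)
    have hih := ih (fun z hz => h z (by simp [hz]))
    simp only [mergeZ, mergeVals, if_neg hxy, filterNZ, List.filter_cons] at *
    simp [hx, hih]

theorem zf_filterNZ (row : List Int) : ∀ x ∈ filterNZ row, x ≠ 0 := by
  intro x hx
  simp [filterNZ, List.mem_filter] at hx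
  exact hx.2

theorem row_low (row : List Int) :
    filterNZ (mergeLoop (filterNZ row)) = mergeVals (filterNZ row) := by
  rw [mergeLoop_eq _ (zf_filterNZ row), filter_mergeZ _ (zf_filterNZ row)]

theorem zf_rev (row : List Int) : ∀ x ∈ (filterNZ row).reverse, x ≠ 0 := by
  intro x hx; exact zf_filterNZ row x (by simpa using hx)

theorem row_high (row : List Int) :
    filterNZ (mergeLoop ((filterNZ row).reverse)).reverse
      = (mergeVals (filterNZ row).reverse).reverse := by
  rw [mergeLoop_eq _ (zf_rev row)]
  have hc : filterNZ ((mergeZ ((filterNZ row).reverse)).reverse)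
      = (filterNZ (mergeZ ((filterNZ row).reverse))).reverse := by
    simp [filterNZ, List.filter_reverse]
  rw [hc, filter_mergeZ _ (zf_rev row)]

-- A's whole direction-4 line pipeline equals B's lineLow, per row
theorem pipeline_low (board : List (List Int)) :
    add_zeros ((board.map filterNZ).map mergeLoop) 4 = board.map lineLow := by
  simp only [add_zeros, List.map_map]
  refine List.map_congr_left (fun row _ => ?_)
  simp only [Function.comp, lineLow, show ((4 : Int) = 2) ↔ False from by norm_num, if_false,
    row_low]

-- A's whole direction-2 line pipeline equals B's lineHigh, per row
theorem pipeline_high (board : List (List Int)) :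
    add_zeros ((((board.map filterNZ).map List.reverse).map mergeLoop).map List.reverse) 2
      = board.map lineHigh := by
  simp only [add_zeros, List.map_map]
  refine List.map_congr_left (fun row _ => ?_)
  simp only [Function.comp, lineHigh, show ((2 : Int) = 2) ↔ True from by norm_num, if_true]
  rw [row_high]

theorem do_merge_eq_alt (board : List (List Int)) (direction vertical : Int) :
    do_merge board direction vertical = do_merge_alt board direction vertical := by
  by_cases h24 : direction = 2 ∨ direction = 4
  · rcases h24 with h2 | h4
    · subst h2
      rw [do_merge, do_merge_alt]
      simp only [show ((2 : Int) = 2 ∨ (2 : Int) = 4) ↔ True from by norm_num, if_true,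
        show ((2 : Int) = 2) ↔ True from by norm_num]
      rw [pipeline_high]
      simp
    · subst h4
      rw [do_merge, do_merge_alt]
      simp only [show ((4 : Int) = 2 ∨ (4 : Int) = 4) ↔ True from by norm_num, if_true,
        show ((4 : Int) = 2) ↔ False from by norm_num, if_false]
      rw [pipeline_low]
      simp
  · by_cases h1 : direction = 1
    · subst h1
      rw [do_merge, do_merge_alt]
      simp only [if_neg h24, show ((1 : Int) = 1) ↔ True from by norm_num, if_true]
      rw [do_merge]
      simp only [show ((4 : Int) = 2 ∨ (4 : Int) = 4) ↔ True from by norm_num, if_true,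
        show ((4 : Int) = 2) ↔ False from by norm_num, if_false,
        show ((1 : Int) ≠ 0) ↔ True from by norm_num]
      rw [pipeline_low]
      simp
    · rw [do_merge, do_merge_alt]
      simp only [if_neg h24, if_neg h1]
      rw [do_merge]
      simp only [show ((2 : Int) = 2 ∨ (2 : Int) = 4) ↔ True from by norm_num, if_true,
        show ((2 : Int) = 2) ↔ True from by norm_num,
        show ((1 : Int) ≠ 0) ↔ True from by norm_num]
      rw [pipeline_high]
      simp

-- ===== VERDICT (by name: the statement is the Claim_ definition above) =====
theorem do_merge_spec : Claim_equal_do_merge := by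
  intro board direction vertical _
  unfold Spec_do_merge
  exact do_merge_eq_alt board direction vertical
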